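-- pv_equiv track=rewrite | github.com/smoalem/Regulatory-Enforcement-Water-Data-Challenge-2022 | wdc_lib-JR.py | water_system_type
-- ===== SOURCE A (Python) =====
-- def water_system_type(smplpttype):
--     water_system = {"GW": ("WL", "SP", "SS", "CC", "CS",
--                            "OT"), "SW": ("IN", "RS", "IG")}
--     water_type = ''
--     for k, it in water_system.items():
--         if smplpttype in it:
--             water_type = k #known?
--         else:
--             pass
--     if water_type == '':
--         water_type = 'pswt'
--     return water_type
-- ===== SOURCE B (Python) =====
-- def water_system_type(smplpttype):
--     lookup = {"WL": "GW", "SP": "GW", "SS": "GW", "CC": "GW", "CS": "GW",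
--               "OT": "GW", "IN": "SW", "RS": "SW", "IG": "SW"}
--     return lookup.get(smplpttype, "pswt")
-- ===== Notes on version B (the rewrite author's own statement) =====
-- stated objective: simpler
-- what changed: Replaces the loop over category->tuple entries with membership tests and a mutable accumulator by one flat inverted code->category dict and a single .get with default 'pswt'.
import Mathlib
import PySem

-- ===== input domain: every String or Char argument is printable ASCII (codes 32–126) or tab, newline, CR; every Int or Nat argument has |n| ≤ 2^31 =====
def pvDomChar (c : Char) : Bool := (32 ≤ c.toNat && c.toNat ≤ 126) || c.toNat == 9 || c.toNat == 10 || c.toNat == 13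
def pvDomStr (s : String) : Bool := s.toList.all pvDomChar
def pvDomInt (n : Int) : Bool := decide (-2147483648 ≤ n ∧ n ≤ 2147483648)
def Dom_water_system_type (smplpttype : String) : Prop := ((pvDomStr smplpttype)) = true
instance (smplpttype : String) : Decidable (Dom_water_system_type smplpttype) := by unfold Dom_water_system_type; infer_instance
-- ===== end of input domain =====

-- B replaces A's scan over the category dict with one flat inverted code->category lookup (objective: simpler).

-- ===== PORT A =====
-- A: iterate over the dict's items, overwrite water_type when smplpttype is in the tuple, default 'pswt'.
def water_system_type (smplpttype : String) : String :=
  let water_system : PySem.Dict String (List String) :=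
    PySem.Dict.ofList [("GW", ["WL", "SP", "SS", "CC", "CS", "OT"]), ("SW", ["IN", "RS", "IG"])]
  let water_type : String :=
    water_system.items.foldl (fun wt kit => if smplpttype ∈ kit.2 then kit.1 else wt) ""
  if water_type = "" then "pswt" else water_type

-- ===== PORT B =====
def water_system_type_alt (smplpttype : String) : String :=
  let lookup : PySem.Dict String String :=
    PySem.Dict.ofList [("WL", "GW"), ("SP", "GW"), ("SS", "GW"), ("CC", "GW"), ("CS", "GW"),
                       ("OT", "GW"), ("IN", "SW"), ("RS", "SW"), ("IG", "SW")]
  lookup.getD smplpttype "pswt"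

-- ===== PRECONDITION & SPEC =====
def Spec_water_system_type (smplpttype : String) (out : String) : Prop := out = water_system_type_alt smplpttype
instance (smplpttype : String) (out : String) : Decidable (Spec_water_system_type smplpttype out) := by unfold Spec_water_system_type; infer_instance

-- ===== CLAIM (what is proved, stated in full; the proofs are below) =====
def Claim_equal_water_system_type : Prop := ∀ (smplpttype : String), Dom_water_system_type smplpttype → Spec_water_system_type smplpttype (water_system_type smplpttype)

-- ===== LEMMAS AND PROOFS =====

-- ===== VERDICT (by name: the statement is the Claim_ definition above) =====
theorem water_system_type_spec : Claim_equal_water_system_type := by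
  intro s _
  unfold Spec_water_system_type water_system_type water_system_type_alt
  by_cases h1 : s = "WL" <;> by_cases h2 : s = "SP" <;> by_cases h3 : s = "SS" <;>
    by_cases h4 : s = "CC" <;> by_cases h5 : s = "CS" <;> by_cases h6 : s = "OT" <;>
    by_cases h7 : s = "IN" <;> by_cases h8 : s = "RS" <;> by_cases h9 : s = "IG" <;>
    first
    | (subst_vars; decide)
    | simp [PySem.Dict.ofList, PySem.Dict.update, PySem.Dict.empty, PySem.Dict.items,
        PySem.Dict.insert, PySem.Dict.getD, PySem.Dict.get?, List.find?_cons, List.foldl, beq_iff_eq, beq_eq_false_iff_ne,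
        h1, h2, h3, h4, h5, h6, h7, h8, h9,
        Ne.symm h1, Ne.symm h2, Ne.symm h3, Ne.symm h4, Ne.symm h5, Ne.symm h6,
        Ne.symm h7, Ne.symm h8, Ne.symm h9]
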